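-- pv_equiv track=rewrite | github.com/ziyeliu86/algorithm | MaxSpacingkClustering/max_spacing_clustering.py | clustering_big
-- ===== SOURCE A (Python) =====
-- class UnionFind():
--     """A python implementation of lazy union find data structure
--     """
--     def __init__(self, num_items):
--         self._parents = list(range(1, num_items + 1))
--         self._sizes = [1] * num_items
--         self._num_group = num_items
--
--     def find(self, i):
--         if self._parents[i-1] != i:
--             return self.find(self._parents[i-1])
--         else:
--             return i
--
--     def cluster_num(self):
--         return self._num_group
--
--     def union(self, j, k):
--         parent_j = self.find(j)
--         parent_k = self.find(k)
--
--         if parent_j == parent_k: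
--             return
--         else:
--             if self._sizes[parent_j - 1] > self._sizes[parent_k - 1]:
--                 self._parents[parent_k - 1] = parent_j
--                 self._sizes[parent_j - 1] += self._sizes[parent_k - 1]
--             else:
--                 self._parents[parent_j - 1] = parent_k
--                 self._sizes[parent_k - 1] += self._sizes[parent_j - 1]
--             self._num_group -= 1
--
-- def node_mapping(nodes):
--     """Convert the bit strings to integers and create a map (=dict) mapping
--     from integer number => array of node IDs. Node ID starts from 1.
--     """
--     n = len(nodes)
--     n_bits = len(nodes[1])
--     nodes_map = {}
--     for i in range(n):
--         ints = [nodes[i][j] * (2 ** (n_bits - j - 1)) for j in range(n_bits)]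
--         mapped = sum(ints)
--         if mapped not in nodes_map:
--             nodes_map[mapped] = [i + 1]
--         else:
--             nodes_map[mapped].append(i + 1)
--     return nodes_map
--
-- def generate_bit_mask(n_bits):
--     """Create an array of bit-masks for the distances.
--     """
--     dist0 = 0
--     dist1 = [1 << i for i in range(n_bits)]
--     dist2 = []
--     for i in range(n_bits-1):
--         for j in range(i+1, n_bits):
--             mask1 = 1 << i
--             mask2 = 1 << j
--             dist2.append(mask1 ^ mask2)
--     mask = [dist0] + dist1 + dist2
--     return mask
--
-- def clustering_big(nodes):
--     n = len(nodes)
--     n_bits = len(nodes[0])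
--
--     mapped_nodes = node_mapping(nodes)
--     masks = generate_bit_mask(n_bits)
--
--     clusters = UnionFind(n)
--
--     for key in mapped_nodes:
--         for mask in masks:
--             if key ^ mask in mapped_nodes:
--                 neigh_nodes = mapped_nodes[key ^ mask]
--                 for node in neigh_nodes:
--                     clusters.union(mapped_nodes[key][0], node)
--     return clusters.cluster_num()
-- ===== SOURCE B (Python) =====
-- def clustering_big(nodes):
--     n = len(nodes)
--     n_bits = len(nodes[0])
--
--     groups = {}
--     for i in range(n):
--         v = 0
--         for j in range(n_bits):
--             v = 2 * v + nodes[i][j]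
--         groups.setdefault(v, []).append(i + 1)
--
--     masks = [0] + [1 << i for i in range(n_bits)] \
--         + [(1 << i) ^ (1 << j) for i in range(n_bits - 1) for j in range(i + 1, n_bits)]
--
--     label = list(range(n))
--     for key in groups:
--         for mask in masks:
--             if key ^ mask in groups:
--                 for node in groups[key ^ mask]:
--                     a = label[groups[key][0] - 1]
--                     b = label[node - 1]
--                     if a != b:
--                         label = [a if x == b else x for x in label]
--     return len(set(label))
-- ===== Notes on version B (the rewrite author's own statement) =====
-- stated objective: simpler
-- what changed: Replaces the lazy union-find (parent forest, recursive find, union by size, maintained group counter) by a flat label array merged by wholesale relabelling, with the cluster count read off as the number of distinct labels; B uses the single natural bit width len(nodes[0]) throughout, so Pre_ excludes inputs whose first two rows differ in length, where A returns a mixed-width result (encoding width from nodes[1], mask width from nodes[0]) and B raises IndexError on the shorter second row.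
-- outside the precondition, e.g. on clustering_big([[1, 0, 1], [1, 0], [0, 1]]): A returns 1, B raises IndexError
import Mathlib
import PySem

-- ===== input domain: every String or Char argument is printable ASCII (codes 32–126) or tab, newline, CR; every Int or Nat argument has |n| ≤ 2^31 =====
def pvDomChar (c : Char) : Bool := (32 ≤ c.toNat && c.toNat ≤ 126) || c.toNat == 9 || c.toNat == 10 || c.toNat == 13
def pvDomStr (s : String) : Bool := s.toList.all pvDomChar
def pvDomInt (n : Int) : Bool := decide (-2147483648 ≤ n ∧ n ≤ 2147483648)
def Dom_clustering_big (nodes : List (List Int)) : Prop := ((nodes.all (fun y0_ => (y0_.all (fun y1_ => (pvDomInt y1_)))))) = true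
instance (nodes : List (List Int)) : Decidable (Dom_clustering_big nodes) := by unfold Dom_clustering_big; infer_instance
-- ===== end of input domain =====

-- B replaces the lazy union-find (parent forest, recursive find, union by size, group counter)
-- by a flat label array merged by wholesale relabelling, counting distinct labels at the end ("simpler"; not faster).

-- ===== PORT A =====
-- UnionFind.find; Python's recursion is unbounded, the fuel is a totality guard (callers pass n+1, always enough)
def ufFind (fuel : Nat) (parents : List Int) (i : Int) : Int :=
  match fuel with
  | 0 => i
  | f + 1 =>
    if (PySem.List.pyGet? parents (i - 1)).getD i ≠ i then
      ufFind f parents ((PySem.List.pyGet? parents (i - 1)).getD i)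
    else i

-- Python list assignment xs[i] = v (negative index from the end; out-of-range guard is unreachable under the invariant)
def pvSetAt (xs : List Int) (i : Int) (v : Int) : List Int :=
  if 0 ≤ (if i < 0 then i + xs.length else i) then
    xs.set (if i < 0 then i + xs.length else i).toNat v
  else xs

-- UnionFind.union on the state (parents, sizes, num_group)
def ufUnion (fuel : Nat) (st : List Int × List Int × Int) (j k : Int) : List Int × List Int × Int :=
  if ufFind fuel st.1 j = ufFind fuel st.1 k then st
  else
    if (PySem.List.pyGet? st.2.1 (ufFind fuel st.1 j - 1)).getD 0 >
        (PySem.List.pyGet? st.2.1 (ufFind fuel st.1 k - 1)).getD 0 then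
      (pvSetAt st.1 (ufFind fuel st.1 k - 1) (ufFind fuel st.1 j),
       pvSetAt st.2.1 (ufFind fuel st.1 j - 1)
         ((PySem.List.pyGet? st.2.1 (ufFind fuel st.1 j - 1)).getD 0 +
          (PySem.List.pyGet? st.2.1 (ufFind fuel st.1 k - 1)).getD 0),
       st.2.2 - 1)
    else
      (pvSetAt st.1 (ufFind fuel st.1 j - 1) (ufFind fuel st.1 k),
       pvSetAt st.2.1 (ufFind fuel st.1 k - 1)
         ((PySem.List.pyGet? st.2.1 (ufFind fuel st.1 k - 1)).getD 0 +
          (PySem.List.pyGet? st.2.1 (ufFind fuel st.1 j - 1)).getD 0),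
       st.2.2 - 1)

def node_mapping (nodes : List (List Int)) : PySem.Dict Int (List Int) :=
  let n := nodes.length
  let n_bits := ((PySem.List.pyGet? nodes 1).getD []).length
  (List.range n).foldl (fun d i =>
    let row := (PySem.List.pyGet? nodes (i : Int)).getD []
    let ints := (List.range n_bits).map (fun (j : Nat) => ((PySem.List.pyGet? row (j : Int)).getD 0) * ((2 : Int) ^ (n_bits - j - 1 : Nat)))
    let mapped := ints.sum
    if ¬ d.contains mapped then d.insert mapped [(i : Int) + 1]
    else d.modify mapped [] (· ++ [(i : Int) + 1])) PySem.Dict.empty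

def generate_bit_mask (n_bits : Nat) : List Int :=
  let dist0 : List Int := [0]
  let dist1 : List Int := (List.range n_bits).map (fun i => (1 : Int) <<< i)
  let dist2 : List Int := (List.range (n_bits - 1)).foldl (fun acc i =>
    (List.range' (i + 1) (n_bits - (i + 1))).foldl (fun acc2 j =>
      acc2 ++ [PySem.Int.bxor ((1 : Int) <<< i) ((1 : Int) <<< j)]) acc) []
  dist0 ++ dist1 ++ dist2

def clustering_big (nodes : List (List Int)) : Int :=
  let n := nodes.length
  let n_bits := ((PySem.List.pyGet? nodes 0).getD []).length
  let mapped := node_mapping nodes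
  let masks := generate_bit_mask n_bits
  let st0 : List Int × List Int × Int := (PySem.List.pyRange 1 ((n : Int) + 1) 1, List.replicate n (1 : Int), (n : Int))
  let stF := mapped.keys.foldl (fun st key =>
    masks.foldl (fun st mask =>
      if mapped.contains (PySem.Int.bxor key mask) then
        (mapped.getD (PySem.Int.bxor key mask) []).foldl (fun st node =>
          ufUnion (st.1.length + 1) st ((PySem.List.pyGet? (mapped.getD key []) 0).getD 0) node) st
      else st) st) st0
  stF.2.2

-- ===== PORT B =====
def altBuildMap (nodes : List (List Int)) : PySem.Dict Int (List Int) :=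
  let n_bits := ((PySem.List.pyGet? nodes 0).getD []).length
  (List.range nodes.length).foldl (fun d i =>
    let row := (PySem.List.pyGet? nodes (i : Int)).getD []
    let v := (List.range n_bits).foldl (fun (acc : Int) (j : Nat) => 2 * acc + (PySem.List.pyGet? row (j : Int)).getD 0) 0
    (d.setdefault v []).modify v [] (· ++ [(i : Int) + 1])) PySem.Dict.empty

def altMasks (n_bits : Nat) : List Int :=
  ([0] : List Int) ++ (List.range n_bits).map (fun i => (1 : Int) <<< i)
      ++ (List.range (n_bits - 1)).flatMap (fun i =>
           (List.range' (i + 1) (n_bits - (i + 1))).map (fun j =>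
             PySem.Int.bxor ((1 : Int) <<< i) ((1 : Int) <<< j)))

def mergeLabels (label : List Int) (j k : Int) : List Int :=
  if (PySem.List.pyGet? label (j - 1)).getD 0 ≠ (PySem.List.pyGet? label (k - 1)).getD 0 then
    label.map (fun x => if x = (PySem.List.pyGet? label (k - 1)).getD 0 then
      (PySem.List.pyGet? label (j - 1)).getD 0 else x)
  else label

def clustering_big_alt (nodes : List (List Int)) : Int :=
  let n := nodes.length
  let n_bits := ((PySem.List.pyGet? nodes 0).getD []).length
  let mapping := altBuildMap nodes
  let masks := altMasks n_bits
  let lab0 : List Int := PySem.List.pyRange 0 (n : Int) 1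
  let labF := mapping.keys.foldl (fun lab key =>
    masks.foldl (fun lab mask =>
      if mapping.contains (PySem.Int.bxor key mask) then
        (mapping.getD (PySem.Int.bxor key mask) []).foldl (fun lab node =>
          mergeLabels lab ((PySem.List.pyGet? (mapping.getD key []) 0).getD 0) node) lab
      else lab) lab) lab0
  ((PySem.Set.ofList labF).length : Int)

-- ===== PRECONDITION & SPEC =====
-- A raises IndexError on fewer than 2 rows (it reads nodes[1]) and on any row shorter than
-- len(nodes[1]). Pre_ additionally excludes inputs whose first two rows have different lengths:
-- there A accidentally encodes rows with nodes[1]'s width while masking with nodes[0]'s width and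
-- returns a mixed-width result, whereas B, using the single natural width len(nodes[0]), raises
-- IndexError on the shorter second row.
def Pre_clustering_big (nodes : List (List Int)) : Prop :=
  2 ≤ nodes.length ∧ (nodes.getD 0 []).length = (nodes.getD 1 []).length ∧
    ∀ row ∈ nodes, (nodes.getD 1 []).length ≤ row.length
instance (nodes : List (List Int)) : Decidable (Pre_clustering_big nodes) := by
  unfold Pre_clustering_big; infer_instance

def pvWitness_clustering_big : List (List Int) := [[0, 1], [1, 0], [0, 1]]

def Spec_clustering_big (nodes : List (List Int)) (out : Int) : Prop := out = clustering_big_alt nodes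
instance (nodes : List (List Int)) (out : Int) : Decidable (Spec_clustering_big nodes out) := by
  unfold Spec_clustering_big; infer_instance

-- ===== CLAIM (what is proved, stated in full; the proofs are below) =====
def Claim_equal_clustering_big : Prop := ∀ (nodes : List (List Int)), Dom_clustering_big nodes → Pre_clustering_big nodes → Spec_clustering_big nodes (clustering_big nodes)

-- ===== LEMMAS AND PROOFS =====

-- ---- basic id/position helpers ----
def pvV (n : Nat) (i : Int) : Prop := 1 ≤ i ∧ i ≤ (n : Int)

def pvPar (parents : List Int) (i : Int) : Int := (PySem.List.pyGet? parents (i - 1)).getD i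

-- chain from i reaches the root r in at most k parent steps
def pvReaches (parents : List Int) : Nat → Int → Int → Prop
  | 0, i, r => i = r ∧ pvPar parents i = i
  | k + 1, i, r => (i = r ∧ pvPar parents i = i) ∨
      (pvPar parents i ≠ i ∧ pvReaches parents k (pvPar parents i) r)

-- number of ids 1..n whose representative under σ is r
def pvCard (n : Nat) (σ : Int → Int) (r : Int) : Nat :=
  (List.range n).countP (fun (m : Nat) => decide (σ ((m : Int) + 1) = r))

def pvSz (sizes : List Int) (r : Int) : Int := (PySem.List.pyGet? sizes (r - 1)).getD 0

def UFInv (n : Nat) (parents sizes : List Int) (σ : Int → Int) : Prop :=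
  parents.length = n ∧ sizes.length = n ∧
  (∀ i, pvV n i → pvV n (σ i)) ∧
  (∀ i, pvV n i → pvV n (pvPar parents i)) ∧
  (∀ i, pvV n i → pvReaches parents (pvCard n σ (σ i) - 1) i (σ i)) ∧
  (∀ r, pvV n r → pvPar parents r = r → pvSz sizes r = (pvCard n σ r : Int))

def labOf (label : List Int) (i : Int) : Int := (PySem.List.pyGet? label (i - 1)).getD 0

def pvRel (n : Nat) (st : List Int × List Int × Int) (label : List Int) : Prop :=
  ∃ σ : Int → Int, UFInv n st.1 st.2.1 σ ∧ label.length = n ∧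
    (∀ i j, pvV n i → pvV n j → (σ i = σ j ↔ labOf label i = labOf label j)) ∧
    st.2.2 = ((PySem.Set.ofList label).length : Int)

-- ---- pvReaches lemmas ----
lemma pvReaches_succ (p : List Int) (k : Nat) (i r : Int) (h : pvReaches p k i r) :
    pvReaches p (k + 1) i r := by
  induction k generalizing i with
  | zero => exact Or.inl h
  | succ k ih =>
    cases h with
    | inl h => exact Or.inl h
    | inr h => exact Or.inr ⟨h.1, ih _ h.2⟩

lemma pvReaches_le (p : List Int) {k k' : Nat} (hk : k ≤ k') (i r : Int)
    (h : pvReaches p k i r) : pvReaches p k' i r := by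
  obtain ⟨m, rfl⟩ := Nat.exists_eq_add_of_le hk
  clear hk
  induction m with
  | zero => exact h
  | succ m ih => exact pvReaches_succ _ _ _ _ ih

lemma pvReaches_root (p : List Int) (k : Nat) (i r : Int) (h : pvReaches p k i r) :
    pvPar p r = r := by
  induction k generalizing i with
  | zero => obtain ⟨rfl, h2⟩ := h; exact h2
  | succ k ih =>
    cases h with
    | inl h => obtain ⟨rfl, h2⟩ := h; exact h2
    | inr h => exact ih _ h.2

lemma pvReaches_of_root_start (p : List Int) (k : Nat) (i r : Int)
    (hroot : pvPar p i = i) (h : pvReaches p k i r) : r = i := by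
  cases k with
  | zero => exact h.1.symm
  | succ k =>
    cases h with
    | inl h => exact h.1.symm
    | inr h => exact absurd hroot h.1

lemma ufFind_of_reaches (p : List Int) (k : Nat) (i r : Int) (fuel : Nat)
    (h : pvReaches p k i r) (hf : k < fuel) : ufFind fuel p i = r := by
  induction k generalizing i fuel with
  | zero =>
    obtain ⟨f, rfl⟩ : ∃ f, fuel = f + 1 := ⟨fuel - 1, by omega⟩
    obtain ⟨rfl, h2⟩ := h
    rw [pvPar] at h2
    simp [ufFind, h2]
  | succ k ih =>
    obtain ⟨f, rfl⟩ : ∃ f, fuel = f + 1 := ⟨fuel - 1, by omega⟩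
    cases h with
    | inl h =>
      obtain ⟨rfl, h2⟩ := h
      rw [pvPar] at h2
      simp [ufFind, h2]
    | inr h =>
      obtain ⟨h1, h2⟩ := h
      rw [pvPar] at h1
      rw [ufFind, if_pos h1]
      exact ih _ _ h2 (by omega)

-- ---- pvSetAt / pvPar lemmas ----
lemma pvSetAt_eq_set {n : Nat} (xs : List Int) (_hlen : xs.length = n) {b : Int}
    (hb : pvV n b) (v : Int) : pvSetAt xs (b - 1) v = xs.set (b - 1).toNat v := by
  obtain ⟨hb1, hb2⟩ := hb
  have h1 : ¬ (b - 1 < 0) := by omega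
  have h2 : (0 : Int) ≤ b - 1 := by omega
  rw [pvSetAt, if_neg h1, if_pos h2]

lemma pyGet?_valid {n : Nat} (xs : List Int) (_hlen : xs.length = n) {x : Int}
    (hx : pvV n x) : PySem.List.pyGet? xs (x - 1) = xs[(x - 1).toNat]? := by
  obtain ⟨h1, h2⟩ := hx
  exact PySem.List.pyGet?_of_nonneg _ (by omega)

lemma length_pvSetAt (xs : List Int) (i v : Int) : (pvSetAt xs i v).length = xs.length := by
  simp only [pvSetAt]
  split <;> split <;> simp

lemma pvPar_setAt_self {n : Nat} (xs : List Int) (hlen : xs.length = n) {b : Int}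
    (hb : pvV n b) (v : Int) : pvPar (pvSetAt xs (b - 1) v) b = v := by
  have hlt : (b - 1).toNat < xs.length := by obtain ⟨h1, h2⟩ := hb; omega
  rw [pvPar, pvSetAt_eq_set xs hlen hb, pyGet?_valid _ (by simp [hlen]) hb,
    List.getElem?_set_self hlt]
  rfl

lemma pvPar_setAt_ne {n : Nat} (xs : List Int) (hlen : xs.length = n) {b x : Int}
    (hb : pvV n b) (hx : pvV n x) (hne : x ≠ b) (v : Int) :
    pvPar (pvSetAt xs (b - 1) v) x = pvPar xs x := by
  have hxb : (b - 1).toNat ≠ (x - 1).toNat := by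
    obtain ⟨h1, h2⟩ := hb; obtain ⟨h3, h4⟩ := hx; omega
  rw [pvPar, pvPar, pvSetAt_eq_set xs hlen hb, pyGet?_valid _ (by simp [hlen]) hx,
    pyGet?_valid _ hlen hx, List.getElem?_set_ne hxb]

lemma pvSz_setAt_self {n : Nat} (xs : List Int) (hlen : xs.length = n) {b : Int}
    (hb : pvV n b) (v : Int) : pvSz (pvSetAt xs (b - 1) v) b = v := by
  have hlt : (b - 1).toNat < xs.length := by obtain ⟨h1, h2⟩ := hb; omega
  rw [pvSz, pvSetAt_eq_set xs hlen hb, pyGet?_valid _ (by simp [hlen]) hb,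
    List.getElem?_set_self hlt]
  rfl

lemma pvSz_setAt_ne {n : Nat} (xs : List Int) (hlen : xs.length = n) {b x : Int}
    (hb : pvV n b) (hx : pvV n x) (hne : x ≠ b) (v : Int) :
    pvSz (pvSetAt xs (b - 1) v) x = pvSz xs x := by
  have hxb : (b - 1).toNat ≠ (x - 1).toNat := by
    obtain ⟨h1, h2⟩ := hb; obtain ⟨h3, h4⟩ := hx; omega
  rw [pvSz, pvSz, pvSetAt_eq_set xs hlen hb, pyGet?_valid _ (by simp [hlen]) hx,
    pyGet?_valid _ hlen hx, List.getElem?_set_ne hxb]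

-- chains that avoid the updated entry are untouched
lemma pvReaches_setAt_ne {n : Nat} (p : List Int) (hlen : p.length = n)
    (hpar : ∀ i, pvV n i → pvV n (pvPar p i)) {b : Int} (hb : pvV n b)
    (hbroot : pvPar p b = b) (v : Int) (k : Nat) :
    ∀ i r, pvV n i → pvReaches p k i r → r ≠ b → pvReaches (pvSetAt p (b - 1) v) k i r := by
  induction k with
  | zero =>
    intro i r hi h hrb
    obtain ⟨rfl, h2⟩ := h
    have hib : i ≠ b := hrb
    exact ⟨rfl, by rw [pvPar_setAt_ne p hlen hb hi hib]; exact h2⟩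
  | succ k ih =>
    intro i r hi h hrb
    cases h with
    | inl h =>
      obtain ⟨rfl, h2⟩ := h
      exact Or.inl ⟨rfl, by rw [pvPar_setAt_ne p hlen hb hi hrb]; exact h2⟩
    | inr h =>
      obtain ⟨h1, h2⟩ := h
      have hib : i ≠ b := by
        rintro rfl; exact h1 hbroot
      refine Or.inr ⟨?_, ?_⟩
      · rw [pvPar_setAt_ne p hlen hb hi hib]; exact h1
      · rw [pvPar_setAt_ne p hlen hb hi hib]
        exact ih _ _ (hpar i hi) h2 hrb

-- linking the dead root b to the live root a extends chains by one step
lemma pvReaches_setAt_dead {n : Nat} (p : List Int) (hlen : p.length = n)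
    (hpar : ∀ i, pvV n i → pvV n (pvPar p i)) {a b : Int} (hb : pvV n b) (ha : pvV n a)
    (hne : a ≠ b) (haroot : pvPar p a = a) (k : Nat) :
    ∀ i, pvV n i → pvReaches p k i b → pvReaches (pvSetAt p (b - 1) a) (k + 1) i a := by
  induction k with
  | zero =>
    intro i hi h
    obtain ⟨rfl, h2⟩ := h
    refine Or.inr ⟨?_, ?_⟩
    · rw [pvPar_setAt_self p hlen hb]; exact fun hab => hne hab
    · rw [pvPar_setAt_self p hlen hb]
      exact ⟨rfl, by rw [pvPar_setAt_ne p hlen hb ha hne]; exact haroot⟩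
  | succ k ih =>
    intro i hi h
    have hbroot : pvPar p b = b := pvReaches_root p _ i b h
    cases h with
    | inl h =>
      obtain ⟨rfl, h2⟩ := h
      have base : pvReaches (pvSetAt p (i - 1) a) 1 i a := by
        refine Or.inr ⟨?_, ?_⟩
        · rw [pvPar_setAt_self p hlen hb]; exact fun hab => hne hab
        · rw [pvPar_setAt_self p hlen hb]
          exact ⟨rfl, by rw [pvPar_setAt_ne p hlen hb ha hne]; exact haroot⟩
      exact pvReaches_le _ (by omega) _ _ base
    | inr h =>
      obtain ⟨h1, h2⟩ := h
      have hib : i ≠ b := by rintro rfl; exact h1 hbroot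
      refine Or.inr ⟨?_, ?_⟩
      · rw [pvPar_setAt_ne p hlen hb hi hib]; exact h1
      · rw [pvPar_setAt_ne p hlen hb hi hib]
        exact ih _ (hpar i hi) h2

-- ---- counting lemmas ----
lemma pvCard_le (n : Nat) (σ : Int → Int) (r : Int) : pvCard n σ r ≤ n := by
  rw [pvCard]
  simpa using List.countP_le_length (p := fun (m : Nat) => decide (σ ((m : Int) + 1) = r)) (l := List.range n)

lemma pvCard_pos (n : Nat) (σ : Int → Int) {r : Int} (hr : pvV n r) (hfix : σ r = r) :
    1 ≤ pvCard n σ r := by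
  have : 0 < pvCard n σ r := by
    rw [pvCard, List.countP_pos_iff]
    obtain ⟨h1, h2⟩ := hr
    have hm : (r - 1).toNat ∈ List.range n := List.mem_range.mpr (by omega)
    exact ⟨(r - 1).toNat, hm,
      by simp only [decide_eq_true_eq]; rw [(by omega : ((r - 1).toNat : Int) + 1 = r), hfix]⟩
  omega

lemma pvCard_merge (n : Nat) (σ : Int → Int) {a b : Int} (hne : a ≠ b) :
    pvCard n (fun i => if σ i = b then a else σ i) a = pvCard n σ a + pvCard n σ b := by
  simp only [pvCard]
  induction n with
  | zero => simp
  | succ m ih =>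
    rw [List.range_succ]
    simp only [List.countP_append, ih]
    by_cases hB : σ ((m : Int) + 1) = b
    · simp [hB, hne, Ne.symm hne]
      omega
    · by_cases hA : σ ((m : Int) + 1) = a <;>
        simp [hB, hA, hne, Ne.symm hne] <;> omega

lemma pvCard_merge_ne (n : Nat) (σ : Int → Int) {a b r : Int} (hra : r ≠ a) :
    pvCard n (fun i => if σ i = b then a else σ i) r = if r = b then 0 else pvCard n σ r := by
  simp only [pvCard]
  induction n with
  | zero => simp
  | succ m ih =>
    rw [List.range_succ]
    simp only [List.countP_append, ih]
    by_cases hrb : r = b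
    · subst hrb
      by_cases hB : σ ((m : Int) + 1) = r <;>
        simp [hB, Ne.symm hra, hra]
    · by_cases hB : σ ((m : Int) + 1) = b
      · simp [hB, hrb, Ne.symm hra, hra, Ne.symm hrb]
      · by_cases hR : σ ((m : Int) + 1) = r <;> simp [hB, hrb, hR]

-- ---- derived invariant facts ----
lemma UFInv.sigma_root {n : Nat} {parents sizes : List Int} {σ : Int → Int}
    (h : UFInv n parents sizes σ) {i : Int} (hi : pvV n i) : pvPar parents (σ i) = σ i := by
  exact pvReaches_root _ _ _ _ (h.2.2.2.2.1 i hi)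

lemma UFInv.root_fixed {n : Nat} {parents sizes : List Int} {σ : Int → Int}
    (h : UFInv n parents sizes σ) {r : Int} (hr : pvV n r) (hroot : pvPar parents r = r) :
    σ r = r := by
  exact pvReaches_of_root_start _ _ _ _ hroot (h.2.2.2.2.1 r hr)

lemma UFInv.sigma_idem {n : Nat} {parents sizes : List Int} {σ : Int → Int}
    (h : UFInv n parents sizes σ) {i : Int} (hi : pvV n i) : σ (σ i) = σ i := by
  exact UFInv.root_fixed h (h.2.2.1 i hi) (UFInv.sigma_root h hi)

lemma UFInv.find_eq {n : Nat} {parents sizes : List Int} {σ : Int → Int}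
    (h : UFInv n parents sizes σ) {i : Int} (hi : pvV n i) :
    ufFind (parents.length + 1) parents i = σ i := by
  have hc := pvCard_le n σ (σ i)
  exact ufFind_of_reaches _ _ _ _ _ (h.2.2.2.2.1 i hi) (by rw [h.1]; omega)

-- ---- pure merge-equivalence logic ----
lemma merge_eq_iff (f : Int → Int) (a b x y : Int) (_hne : a ≠ b) :
    ((if f x = b then a else f x) = (if f y = b then a else f y)) ↔
      (f x = f y ∨ (f x = a ∧ f y = b) ∨ (f x = b ∧ f y = a)) := by
  by_cases h1 : f x = b <;> by_cases h2 : f y = b <;> simp [h1, h2] <;> tauto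

-- ---- labels ----
lemma labOf_map {n : Nat} (label : List Int) (hlen : label.length = n) (f : Int → Int)
    {i : Int} (hi : pvV n i) : labOf (label.map f) i = f (labOf label i) := by
  have hp : (i - 1).toNat < label.length := by obtain ⟨h1, h2⟩ := hi; omega
  rw [labOf, labOf, pyGet?_valid _ (by simp [hlen] : (label.map f).length = n) hi,
    pyGet?_valid _ hlen hi, List.getElem?_map, List.getElem?_eq_getElem hp]
  rfl

lemma labOf_mem {n : Nat} (label : List Int) (hlen : label.length = n) {i : Int}
    (hi : pvV n i) : labOf label i ∈ label := by
  have hp : (i - 1).toNat < label.length := by obtain ⟨h1, h2⟩ := hi; omega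
  rw [labOf, pyGet?_valid _ hlen hi, List.getElem?_eq_getElem hp]
  simpa using List.getElem_mem hp

-- replacing one present value b by another present value a loses exactly one distinct element
lemma ofList_map_merge_length (label : List Int) {a b : Int} (ha : a ∈ label)
    (hb : b ∈ label) (hne : a ≠ b) :
    ((PySem.Set.ofList (label.map (fun x => if x = b then a else x))).length : Int)
      = ((PySem.Set.ofList label).length : Int) - 1 := by
  have hset : ∀ l : List Int, (PySem.Set.ofList l).length = l.toFinset.card := by
    intro l
    rw [← List.toFinset_card_of_nodup (PySem.Set.nodup_ofList (xs := l))]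
    congr 1
    ext x
    simp [PySem.Set.mem_ofList]
  rw [hset, hset]
  have himg : (label.map (fun x => if x = b then a else x)).toFinset
      = label.toFinset.erase b := by
    have hm : (label.map (fun x => if x = b then a else x)).toFinset
        = label.toFinset.image (fun x => if x = b then a else x) := by
      ext x; simp
    rw [hm]
    ext y
    simp only [Finset.mem_image, Finset.mem_erase, List.mem_toFinset]
    constructor
    · rintro ⟨x, hx, rfl⟩
      by_cases hxb : x = b
      · simp [hxb, ha, hne]
      · simp [hxb]; exact hx
    · intro ⟨hyb, hy⟩
      exact ⟨y, hy, by simp [hyb]⟩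
  rw [himg, Finset.card_erase_of_mem (List.mem_toFinset.mpr hb)]
  have hpos : 0 < label.toFinset.card := Finset.card_pos.mpr ⟨b, List.mem_toFinset.mpr hb⟩
  omega

-- ---- the union / merge simulation step ----
-- linking the root b under the root a updates the invariant with the merged representative map
lemma link_inv {n : Nat} {parents sizes : List Int} {σ : Int → Int}
    (hinv : UFInv n parents sizes σ) {a b : Int} (ha : pvV n a) (hb : pvV n b)
    (haroot : pvPar parents a = a) (hbroot : pvPar parents b = b)
    (hafix : σ a = a) (hab : a ≠ b) :
    UFInv n (pvSetAt parents (b - 1) a)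
      (pvSetAt sizes (a - 1) (pvSz sizes a + pvSz sizes b))
      (fun i => if σ i = b then a else σ i) := by
  have hbfix := UFInv.root_fixed hinv hb hbroot
  obtain ⟨hplen, hslen, hσV, hparV, hreach, hsz⟩ := hinv
  refine ⟨?_, ?_, ?_, ?_, ?_, ?_⟩
  · rw [length_pvSetAt, hplen]
  · rw [length_pvSetAt, hslen]
  · intro i hi
    dsimp only
    split
    · exact ha
    · exact hσV i hi
  · intro i hi
    by_cases hib : i = b
    · subst hib
      rw [pvPar_setAt_self parents hplen hb]
      exact ha
    · rw [pvPar_setAt_ne parents hplen hb hi hib]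
      exact hparV i hi
  · intro i hi
    dsimp only
    by_cases hib : σ i = b
    · rw [if_pos hib]
      have hR := hreach i hi
      rw [hib] at hR
      have hR' := pvReaches_setAt_dead parents hplen hparV hb ha hab haroot _ i hi hR
      refine pvReaches_le _ ?_ _ _ hR'
      rw [pvCard_merge n σ hab]
      have h1 := pvCard_pos n σ ha hafix
      have h2 := pvCard_pos n σ hb hbfix
      omega
    · rw [if_neg hib]
      have hR := pvReaches_setAt_ne parents hplen hparV hb hbroot a _ i (σ i) hi (hreach i hi) hib
      by_cases hia : σ i = a
      · have hb1 : pvCard n (fun i => if σ i = b then a else σ i) (σ i)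
            = pvCard n σ a + pvCard n σ b := by
          rw [hia, pvCard_merge n σ hab]
        rw [hb1]
        refine pvReaches_le _ ?_ _ _ hR
        rw [hia]
        omega
      · rw [pvCard_merge_ne n σ hia, if_neg hib]
        exact hR
  · intro r hr hroot'
    have hrb : r ≠ b := by
      rintro rfl
      rw [pvPar_setAt_self parents hplen hb] at hroot'
      exact hab hroot'
    have hrootold : pvPar parents r = r := by
      rw [pvPar_setAt_ne parents hplen hb hr hrb] at hroot'
      exact hroot'
    by_cases hra : r = a
    · subst hra
      rw [pvSz_setAt_self sizes hslen ha, hsz r hr hrootold, hsz b hb hbroot,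
        pvCard_merge n σ hab]
      push_cast
      ring
    · rw [pvSz_setAt_ne sizes hslen ha hr hra, hsz r hr hrootold,
        pvCard_merge_ne n σ hra, if_neg hrb]

set_option maxHeartbeats 1600000 in
lemma union_preserves {n : Nat} {st : List Int × List Int × Int} {label : List Int}
    (hrel : pvRel n st label) {j k : Int} (hj : pvV n j) (hk : pvV n k) :
    pvRel n (ufUnion (st.1.length + 1) st j k) (mergeLabels label j k) := by
  obtain ⟨parents, sizes, g⟩ := st
  obtain ⟨σ, hinv, hlen, hequiv, hcount⟩ := hrel
  dsimp only at hinv hcount ⊢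
  have hfj := UFInv.find_eq hinv hj
  have hfk := UFInv.find_eq hinv hk
  have hml : mergeLabels label j k
      = if labOf label j ≠ labOf label k then
          label.map (fun x => if x = labOf label k then labOf label j else x)
        else label := rfl
  rw [ufUnion]
  dsimp only
  rw [hfj, hfk]
  by_cases hsame : σ j = σ k
  · rw [if_pos hsame, hml,
      if_neg (by simpa using (hequiv j k hj hk).mp hsame)]
    exact ⟨σ, hinv, hlen, hequiv, hcount⟩
  · have hlab : labOf label j ≠ labOf label k := fun h => hsame ((hequiv j k hj hk).mpr h)
    rw [if_neg hsame, hml, if_pos hlab]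
    have hjV := hinv.2.2.1 j hj
    have hkV := hinv.2.2.1 k hk
    have hjroot := UFInv.sigma_root hinv hj
    have hkroot := UFInv.sigma_root hinv hk
    have hjfix := UFInv.sigma_idem hinv hj
    have hkfix := UFInv.sigma_idem hinv hk
    have hlen' : (label.map (fun x => if x = labOf label k then labOf label j else x)).length = n := by
      rw [List.length_map]; exact hlen
    have hlab' : ∀ x, pvV n x →
        labOf (label.map (fun y => if y = labOf label k then labOf label j else y)) x
          = if labOf label x = labOf label k then labOf label j else labOf label x :=
      fun x hx => labOf_map label hlen _ hx
    have hcount' : g - 1 = ((PySem.Set.ofList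
        (label.map (fun x => if x = labOf label k then labOf label j else x))).length : Int) := by
      rw [ofList_map_merge_length label (labOf_mem label hlen hj) (labOf_mem label hlen hk) hlab,
        ← hcount]
    split
    · -- σ j's tree absorbs σ k's tree
      refine ⟨fun i => if σ i = σ k then σ j else σ i,
        link_inv hinv hjV hkV hjroot hkroot hjfix hsame, hlen', ?_, hcount'⟩
      intro x y hx hy
      rw [hlab' x hx, hlab' y hy, merge_eq_iff σ _ _ _ _ hsame,
        merge_eq_iff (labOf label) _ _ _ _ hlab]
      have e1 := hequiv x y hx hy
      have e2 := hequiv x j hx hj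
      have e3 := hequiv y k hy hk
      have e4 := hequiv x k hx hk
      have e5 := hequiv y j hy hj
      tauto
    · -- σ k's tree absorbs σ j's tree
      refine ⟨fun i => if σ i = σ j then σ k else σ i,
        link_inv hinv hkV hjV hkroot hjroot hkfix (Ne.symm hsame), hlen', ?_, hcount'⟩
      intro x y hx hy
      rw [hlab' x hx, hlab' y hy, merge_eq_iff σ _ _ _ _ (Ne.symm hsame),
        merge_eq_iff (labOf label) _ _ _ _ hlab]
      have e1 := hequiv x y hx hy
      have e2 := hequiv x j hx hj
      have e3 := hequiv y k hy hk
      have e4 := hequiv x k hx hk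
      have e5 := hequiv y j hy hj
      tauto

-- ---- loop simulation ----
def pvDictOK (n : Nat) (d : PySem.Dict Int (List Int)) : Prop :=
  ∀ k v, d.get? k = some v → v ≠ [] ∧ ∀ x ∈ v, pvV n x

lemma sim_inner {n : Nat} {j : Int} (hjv : pvV n j) (vs : List Int)
    (hvs : ∀ x ∈ vs, pvV n x) :
    ∀ st label, pvRel n st label →
    pvRel n (vs.foldl (fun st node => ufUnion (st.1.length + 1) st j node) st)
      (vs.foldl (fun lab node => mergeLabels lab j node) label) := by
  induction vs with
  | nil => exact fun _ _ h => h
  | cons v vs ih =>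
    intro st label h
    exact ih (fun x hx => hvs x (by simp [hx])) _ _
      (union_preserves h hjv (hvs v (by simp)))

lemma dict_getD_props {n : Nat} (d : PySem.Dict Int (List Int)) (hd : pvDictOK n d)
    {c : Int} (hc : d.contains c = true) :
    d.getD c [] ≠ [] ∧ ∀ x ∈ d.getD c [], pvV n x := by
  obtain ⟨w, hw⟩ : ∃ w, d.get? c = some w := by
    rcases hh : d.get? c with _ | w
    · rw [(PySem.Dict.get?_eq_none_iff_contains d c).mp hh] at hc
      exact absurd hc (by simp)
    · exact ⟨w, rfl⟩
  rw [PySem.Dict.getD_of_get?_eq_some d [] hw]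
  exact hd c w hw

lemma dict_key_arg {n : Nat} (d : PySem.Dict Int (List Int)) (hd : pvDictOK n d)
    {key : Int} (hkey : key ∈ d.keys) :
    pvV n ((PySem.List.pyGet? (d.getD key []) 0).getD 0) := by
  have hc : d.contains key = true := (PySem.Dict.contains_iff_mem_keys d key).mpr hkey
  obtain ⟨hne, hval⟩ := dict_getD_props d hd hc
  rcases hv : d.getD key [] with _ | ⟨x, xs⟩
  · exact absurd hv hne
  · rw [PySem.List.pyGet?_zero_cons]
    exact hval x (by rw [hv]; simp)

lemma sim_mask {n : Nat} (d : PySem.Dict Int (List Int)) (hd : pvDictOK n d)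
    {key : Int} (hkey : key ∈ d.keys) (masks : List Int) :
    ∀ st label, pvRel n st label →
    pvRel n
      (masks.foldl (fun st mask =>
        if d.contains (PySem.Int.bxor key mask) then
          (d.getD (PySem.Int.bxor key mask) []).foldl (fun st node =>
            ufUnion (st.1.length + 1) st ((PySem.List.pyGet? (d.getD key []) 0).getD 0) node) st
        else st) st)
      (masks.foldl (fun lab mask =>
        if d.contains (PySem.Int.bxor key mask) then
          (d.getD (PySem.Int.bxor key mask) []).foldl (fun lab node =>
            mergeLabels lab ((PySem.List.pyGet? (d.getD key []) 0).getD 0) node) lab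
        else lab) label) := by
  induction masks with
  | nil => exact fun _ _ h => h
  | cons m ms ih =>
    intro st label h
    simp only [List.foldl_cons]
    refine ih _ _ ?_
    by_cases hc : d.contains (PySem.Int.bxor key m) = true
    · rw [if_pos hc, if_pos hc]
      exact sim_inner (dict_key_arg d hd hkey) _ (dict_getD_props d hd hc).2 _ _ h
    · rw [if_neg hc, if_neg hc]
      exact h

lemma sim_fold {n : Nat} (d : PySem.Dict Int (List Int)) (hd : pvDictOK n d)
    (masks : List Int) (keys : List Int) (hkeys : ∀ k ∈ keys, k ∈ d.keys)
    {st : List Int × List Int × Int} {label : List Int} (hrel : pvRel n st label) :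
    pvRel n
      (keys.foldl (fun st key =>
        masks.foldl (fun st mask =>
          if d.contains (PySem.Int.bxor key mask) then
            (d.getD (PySem.Int.bxor key mask) []).foldl (fun st node =>
              ufUnion (st.1.length + 1) st ((PySem.List.pyGet? (d.getD key []) 0).getD 0) node) st
          else st) st) st)
      (keys.foldl (fun lab key =>
        masks.foldl (fun lab mask =>
          if d.contains (PySem.Int.bxor key mask) then
            (d.getD (PySem.Int.bxor key mask) []).foldl (fun lab node =>
              mergeLabels lab ((PySem.List.pyGet? (d.getD key []) 0).getD 0) node) lab
          else lab) lab) label) := by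
  induction keys generalizing st label with
  | nil => exact hrel
  | cons key ks ih =>
    simp only [List.foldl_cons]
    exact ih (fun x hx => hkeys x (by simp [hx]))
      (sim_mask d hd (hkeys key (by simp)) masks _ _ hrel)

-- ---- the two dicts and the two mask lists agree (under equal widths) ----
lemma horner_eq (m : Nat) (g : Nat → Int) :
    (List.range m).foldl (fun acc j => 2 * acc + g j) 0
      = ((List.range m).map (fun j => g j * ((2 : Int) ^ (m - j - 1 : Nat)))).sum := by
  induction m with
  | zero => simp
  | succ t ih =>
    rw [List.range_succ, List.foldl_append, List.map_append, List.sum_append, ih]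
    simp only [List.foldl_cons, List.foldl_nil, List.map_cons, List.map_nil,
      List.sum_cons, List.sum_nil]
    have hm : (List.range t).map (fun j => g j * ((2 : Int) ^ (t + 1 - j - 1 : Nat)))
        = (List.range t).map (fun j => (g j * ((2 : Int) ^ (t - j - 1 : Nat))) * 2) := by
      apply List.map_congr_left
      intro j hj
      have hjt := List.mem_range.mp hj
      have he : (t + 1 - j - 1 : Nat) = (t - j - 1) + 1 := by omega
      rw [he, pow_succ]
      ring
    rw [hm, List.sum_map_mul_right]
    have ht : (t + 1 - t - 1 : Nat) = 0 := by omega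
    rw [ht, pow_zero]
    ring

lemma dicts_eq (nodes : List (List Int))
    (hw : ((PySem.List.pyGet? nodes 0).getD []).length = ((PySem.List.pyGet? nodes 1).getD []).length) :
    altBuildMap nodes = node_mapping nodes := by
  rw [altBuildMap, node_mapping]
  simp only [hw]
  apply PySem.List.foldl_congr_mem
  intro d i _hi
  dsimp only
  rw [horner_eq (((PySem.List.pyGet? nodes 1).getD []).length)
    (fun j => (PySem.List.pyGet? ((PySem.List.pyGet? nodes (i : Int)).getD []) (j : Int)).getD 0)]
  by_cases hc : d.contains ((((List.range (((PySem.List.pyGet? nodes 1).getD []).length)).map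
      (fun (j : Nat) => ((PySem.List.pyGet? ((PySem.List.pyGet? nodes (i : Int)).getD []) (j : Int)).getD 0) *
        ((2 : Int) ^ ((((PySem.List.pyGet? nodes 1).getD []).length) - j - 1 : Nat)))).sum)) = true
  · rw [PySem.Dict.setdefault_of_contains d [] hc, if_neg (not_not_intro hc)]
  · have hc' := eq_false_of_ne_true hc
    rw [PySem.Dict.setdefault_of_not_contains d [] hc', if_pos hc]
    rw [PySem.Dict.modify, PySem.Dict.getD_insert_self, PySem.Dict.insert_insert_self,
      List.nil_append]

lemma masks_eq (m : Nat) : altMasks m = generate_bit_mask m := by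
  simp only [generate_bit_mask, altMasks, PySem.List.foldl_append_singleton_eq_map,
    PySem.List.foldl_append_eq_flatMap, List.nil_append, List.append_assoc]

lemma dictStep_ok {n : Nat} (d : PySem.Dict Int (List Int)) (hd : pvDictOK n d)
    (enc : Int) {i : Nat} (hi : i < n) :
    pvDictOK n (if ¬ d.contains enc then d.insert enc [(i : Int) + 1]
      else d.modify enc [] (· ++ [(i : Int) + 1])) := by
  intro key v
  by_cases hc : d.contains enc
  · rw [if_neg (by simp [hc] : ¬ ¬ d.contains enc = true)]
    simp only [PySem.Dict.modify]
    rw [PySem.Dict.get?_insert]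
    split
    · rintro h
      obtain rfl : d.getD enc [] ++ [(i : Int) + 1] = v := by injection h
      obtain ⟨w, hw⟩ : ∃ w, d.get? enc = some w := by
        rcases hh : d.get? enc with _ | w
        · exact absurd ((PySem.Dict.get?_eq_none_iff_contains d enc).mp hh) (by simp [hc])
        · exact ⟨w, rfl⟩
      obtain ⟨hne, hval⟩ := hd enc w hw
      rw [PySem.Dict.getD_of_get?_eq_some d [] hw]
      refine ⟨by simp, ?_⟩
      intro x hx
      rcases List.mem_append.mp hx with hx | hx
      · exact hval x hx
      · obtain rfl := List.mem_singleton.mp hx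
        exact ⟨by omega, by omega⟩
    · exact hd key v
  · rw [if_pos hc, PySem.Dict.get?_insert]
    split
    · rintro h
      obtain rfl : [(i : Int) + 1] = v := by injection h
      refine ⟨by simp, ?_⟩
      rintro x hx
      obtain rfl := List.mem_singleton.mp hx
      exact ⟨by omega, by omega⟩
    · exact hd key v

lemma node_mapping_ok (nodes : List (List Int)) : pvDictOK nodes.length (node_mapping nodes) := by
  rw [node_mapping]
  have hgen : ∀ (l : List Nat), (∀ i ∈ l, i < nodes.length) →
      ∀ d : PySem.Dict Int (List Int), pvDictOK nodes.length d →
      pvDictOK nodes.length (l.foldl (fun d i =>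
        if ¬ d.contains ((((List.range ((PySem.List.pyGet? nodes 1).getD []).length).map
            (fun (j : Nat) => ((PySem.List.pyGet? ((PySem.List.pyGet? nodes (i : Int)).getD []) (j : Int)).getD 0) *
              ((2 : Int) ^ (((PySem.List.pyGet? nodes 1).getD []).length - j - 1 : Nat)))).sum))
          then d.insert ((((List.range ((PySem.List.pyGet? nodes 1).getD []).length).map
            (fun (j : Nat) => ((PySem.List.pyGet? ((PySem.List.pyGet? nodes (i : Int)).getD []) (j : Int)).getD 0) *
              ((2 : Int) ^ (((PySem.List.pyGet? nodes 1).getD []).length - j - 1 : Nat)))).sum)) [(i : Int) + 1]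
          else d.modify ((((List.range ((PySem.List.pyGet? nodes 1).getD []).length).map
            (fun (j : Nat) => ((PySem.List.pyGet? ((PySem.List.pyGet? nodes (i : Int)).getD []) (j : Int)).getD 0) *
              ((2 : Int) ^ (((PySem.List.pyGet? nodes 1).getD []).length - j - 1 : Nat)))).sum)) [] (· ++ [(i : Int) + 1])) d) := by
    intro l
    induction l with
    | nil => intro _ d hd; exact hd
    | cons x xs ih =>
      intro hl d hd
      exact ih (fun i hi => hl i (by simp [hi])) _
        (dictStep_ok d hd _ (hl x (by simp)))
  exact hgen (List.range nodes.length) (fun i hi => List.mem_range.mp hi) _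
    (by intro k v h; simp [PySem.Dict.get?_empty] at h)

-- ---- initial state ----
lemma pvReaches_refl (p : List Int) (i : Int) (hroot : pvPar p i = i) (k : Nat) :
    pvReaches p k i i := by
  cases k with
  | zero => exact ⟨rfl, hroot⟩
  | succ k => exact Or.inl ⟨rfl, hroot⟩

lemma pvCard_id (n : Nat) {r : Int} (hr : pvV n r) : pvCard n (fun i => i) r = 1 := by
  obtain ⟨h1, h2⟩ := hr
  rw [pvCard]
  have hcg : (List.range n).countP (fun (m : Nat) => decide (((m : Int) + 1) = r))
      = (List.range n).countP (fun (m : Nat) => m == (r - 1).toNat) := by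
    apply List.countP_congr
    intro m _
    constructor
    · intro h
      simp only [decide_eq_true_eq] at h
      simp only [beq_iff_eq]
      omega
    · intro h
      simp only [beq_iff_eq] at h
      simp only [decide_eq_true_eq]
      omega
  rw [hcg, ← List.count_eq_countP]
  exact List.count_eq_one_of_mem List.nodup_range (List.mem_range.mpr (by omega))

lemma parents0_par (n : Nat) {i : Int} (hi : pvV n i) :
    pvPar (PySem.List.pyRange 1 ((n : Int) + 1) 1) i = i := by
  obtain ⟨h1, h2⟩ := hi
  rw [pvPar, PySem.List.pyRange_one, PySem.List.pyGet?_of_nonneg _ (by omega)]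
  have hlt : (i - 1).toNat < ((n : Int) + 1 - 1).toNat := by omega
  rw [List.getElem?_map, List.getElem?_range (by simpa using hlt)]
  simp only [Option.map_some, Option.getD_some]
  omega

lemma label0_labOf (n : Nat) {i : Int} (hi : pvV n i) :
    labOf (PySem.List.pyRange 0 (n : Int) 1) i = i - 1 := by
  obtain ⟨h1, h2⟩ := hi
  rw [labOf, PySem.List.pyRange_one, PySem.List.pyGet?_of_nonneg _ (by omega)]
  have hlt : (i - 1).toNat < ((n : Int) - 0).toNat := by omega
  rw [List.getElem?_map, List.getElem?_range (by simpa using hlt)]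
  simp only [Option.map_some, Option.getD_some]
  omega

lemma rel_init (n : Nat) :
    pvRel n (PySem.List.pyRange 1 ((n : Int) + 1) 1, List.replicate n (1 : Int), (n : Int))
      (PySem.List.pyRange 0 (n : Int) 1) := by
  refine ⟨fun i => i, ⟨?_, ?_, ?_, ?_, ?_, ?_⟩, ?_, ?_, ?_⟩ <;> dsimp only
  · simp [PySem.List.length_pyRange_one]
  · simp
  · exact fun i hi => hi
  · intro i hi; rw [parents0_par n hi]; exact hi
  · intro i hi
    exact pvReaches_refl _ _ (parents0_par n hi) _
  · intro r hr _
    have h1 := hr.1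
    have h2 := hr.2
    rw [pvCard_id n hr, pvSz, PySem.List.pyGet?_of_nonneg _ (by omega),
      List.getElem?_replicate, if_pos (by omega)]
    rfl
  · simp [PySem.List.length_pyRange_one]
  · intro i j hi hj
    rw [label0_labOf n hi, label0_labOf n hj]
    constructor
    · intro h
      omega
    · intro h
      omega
  · have h := PySem.Set.ofList_eq_self_of_nodup (PySem.List.pyRange 0 (n : Int) 1)
      (PySem.List.nodup_pyRange_one 0 (n : Int))
    rw [h]
    simp [PySem.List.length_pyRange_one]

-- bridge from Pre_'s List.getD form to the ports' pyGet? form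
lemma pyGet?_getD_nat (xs : List (List Int)) (i : Nat) :
    (PySem.List.pyGet? xs (i : Int)).getD [] = xs.getD i [] := by
  rw [PySem.List.pyGet?_natCast, List.getD_eq_getElem?_getD]

-- ===== VERDICT (by name: the statement is the Claim_ definition above) =====
theorem clustering_big_spec : Claim_equal_clustering_big := by
  intro nodes _hdom hpre
  unfold Spec_clustering_big
  show clustering_big nodes = clustering_big_alt nodes
  have hw : ((PySem.List.pyGet? nodes 0).getD []).length
      = ((PySem.List.pyGet? nodes 1).getD []).length := by
    have h0 := pyGet?_getD_nat nodes 0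
    have h1 := pyGet?_getD_nat nodes 1
    simp only [Nat.cast_zero, Nat.cast_one] at h0 h1
    rw [h0, h1, hpre.2.1]
  simp only [clustering_big, clustering_big_alt, dicts_eq nodes hw, masks_eq]
  have hrel := sim_fold (n := nodes.length) (node_mapping nodes) (node_mapping_ok nodes)
    (generate_bit_mask ((PySem.List.pyGet? nodes 0).getD []).length)
    (node_mapping nodes).keys (fun k hk => hk) (rel_init nodes.length)
  obtain ⟨σ, _hinv, _hlen, _hequiv, hcount⟩ := hrel
  exact hcount
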